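-- pv_equiv track=rewrite | github.com/dr-daneger/fantasy-football | yahoo/yahoo_rosters.py | choose_primary_from_eligible
-- ===== SOURCE A (Python) =====
-- from typing import Dict, List, Optional, Any
--
-- PREFERRED_POS_ORDER = ['QB', 'RB', 'WR', 'TE', 'K', 'DEF']
--
-- def choose_primary_from_eligible(eligible: Any) -> Optional[str]:
--     if not isinstance(eligible, list):
--         return None
--     candidates = [pos for pos in eligible if pos in PREFERRED_POS_ORDER]
--     if candidates:
--         for pref in PREFERRED_POS_ORDER:
--             if pref in candidates:
--                 return pref
--     for pos in eligible:
--         if pos and pos not in ("W/R/T", "W/T", "R/W", "WR/RB", "RB/WR", "TE/W", "BN"):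
--             return pos
--     return None
-- ===== SOURCE B (Python) =====
-- from typing import Dict, List, Optional, Any
--
-- PREFERRED_POS_ORDER = ['QB', 'RB', 'WR', 'TE', 'K', 'DEF']
--
-- def choose_primary_from_eligible(eligible: Any) -> Optional[str]:
--     if not isinstance(eligible, list):
--         return None
--     # one pass: track the smallest preference rank seen (len(...) = "none found")
--     best = len(PREFERRED_POS_ORDER)
--     for pos in eligible:
--         if pos in PREFERRED_POS_ORDER:
--             i = PREFERRED_POS_ORDER.index(pos)
--             if i < best:
--                 best = i
--     if best < len(PREFERRED_POS_ORDER):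
--         return PREFERRED_POS_ORDER[best]
--     for pos in eligible:
--         if pos and pos not in ("W/R/T", "W/T", "R/W", "WR/RB", "RB/WR", "TE/W", "BN"):
--             return pos
--     return None
-- ===== Notes on version B (the rewrite author's own statement) =====
-- stated objective: alternative
-- what changed: Replaces A's build-candidates-then-rescan-the-preference-list strategy (filter pass plus a second membership-gated scan over PREFERRED_POS_ORDER) with a single pass over eligible that tracks the minimum PREFERRED_POS_ORDER rank seen, indexing the canonical position afterwards; the fallback loop is unchanged.
import Mathlib
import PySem

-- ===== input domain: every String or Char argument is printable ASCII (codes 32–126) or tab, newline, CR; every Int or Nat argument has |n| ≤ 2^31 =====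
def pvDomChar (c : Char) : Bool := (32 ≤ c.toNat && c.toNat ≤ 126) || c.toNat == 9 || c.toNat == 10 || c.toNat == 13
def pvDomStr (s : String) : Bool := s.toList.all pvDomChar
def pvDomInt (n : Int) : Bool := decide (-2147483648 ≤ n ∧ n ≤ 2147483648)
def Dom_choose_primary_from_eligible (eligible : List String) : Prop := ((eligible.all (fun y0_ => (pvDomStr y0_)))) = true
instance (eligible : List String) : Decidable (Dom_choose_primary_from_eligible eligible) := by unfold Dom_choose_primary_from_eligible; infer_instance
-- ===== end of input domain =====

-- B replaces A's filter-then-rescan-the-preference-list strategy with a single pass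
-- tracking the minimum preference rank (objective: alternative decomposition, same cost).

-- ===== PORT A =====
def pvPreferred : List String := ["QB", "RB", "WR", "TE", "K", "DEF"]

-- the blacklist tuple of the shared fallback loop
def pvBlacklist : List String := ["W/R/T", "W/T", "R/W", "WR/RB", "RB/WR", "TE/W", "BN"]

-- the final `for pos in eligible: if pos and pos not in (...): return pos` loop,
-- textually identical in A and in B
def pvFallback : List String → Option String
  | [] => none
  | pos :: rest =>
      if pos ≠ "" ∧ ¬ (pvBlacklist.contains pos) then some pos else pvFallback rest

-- A's `for pref in PREFERRED_POS_ORDER: if pref in candidates: return pref`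
def pvFindPref : List String → List String → Option String
  | [], _ => none
  | pref :: rest, cand => if cand.contains pref then some pref else pvFindPref rest cand

def choose_primary_from_eligible (eligible : List String) : Option String :=
  let candidates := eligible.filter (fun pos => pvPreferred.contains pos)
  match (if candidates.isEmpty then none else pvFindPref pvPreferred candidates) with
  | some pref => some pref
  | none => pvFallback eligible

-- ===== PORT B =====
-- loop body: `if pos in PREFERRED_POS_ORDER: i = PREFERRED_POS_ORDER.index(pos); if i < best: best = i`
def pvRankStep (r : Nat) (pos : String) : Nat :=
  if pvPreferred.contains pos then
    (if pvPreferred.idxOf pos < r then pvPreferred.idxOf pos else r)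
  else r

def choose_primary_from_eligible_alt (eligible : List String) : Option String :=
  let best := eligible.foldl pvRankStep pvPreferred.length
  if best < pvPreferred.length then some (pvPreferred.getD best "")
  else pvFallback eligible

-- ===== PRECONDITION & SPEC =====
def Spec_choose_primary_from_eligible (eligible : List String) (out : Option String) : Prop := out = choose_primary_from_eligible_alt eligible
instance (eligible : List String) (out : Option String) : Decidable (Spec_choose_primary_from_eligible eligible out) := by unfold Spec_choose_primary_from_eligible; infer_instance

-- ===== CLAIM (what is proved, stated in full; the proofs are below) =====
def Claim_equal_choose_primary_from_eligible : Prop := ∀ (eligible : List String), Dom_choose_primary_from_eligible eligible → Spec_choose_primary_from_eligible eligible (choose_primary_from_eligible eligible)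

-- ===== LEMMAS AND PROOFS =====

theorem pvRankStep_le (r : Nat) (p : String) : pvRankStep r p ≤ r := by
  unfold pvRankStep; split_ifs <;> omega

theorem pvRankStep_le_rank (r : Nat) (p : String) (h : pvPreferred.contains p = true) :
    pvRankStep r p ≤ pvPreferred.idxOf p := by
  unfold pvRankStep; rw [if_pos h]; split_ifs <;> omega

theorem pvRankStep_pos (a : Nat) (x : String) (hc : pvPreferred.contains x = true)
    (hlt : pvPreferred.idxOf x < a) : pvRankStep a x = pvPreferred.idxOf x := by
  unfold pvRankStep; rw [if_pos hc, if_pos hlt]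

theorem pvRankStep_keep1 (a : Nat) (x : String) (hc : pvPreferred.contains x = true)
    (hge : ¬ pvPreferred.idxOf x < a) : pvRankStep a x = a := by
  unfold pvRankStep; rw [if_pos hc, if_neg hge]

theorem pvRankStep_keep2 (a : Nat) (x : String) (hc : ¬ pvPreferred.contains x = true) :
    pvRankStep a x = a := by
  unfold pvRankStep; rw [if_neg hc]

theorem pvFold_le_init : ∀ (xs : List String) (a : Nat), xs.foldl pvRankStep a ≤ a := by
  intro xs
  induction xs with
  | nil => intro a; simp [List.foldl]
  | cons x xs ih =>
      intro a
      simpa [List.foldl] using le_trans (ih (pvRankStep a x)) (pvRankStep_le a x)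

theorem pvFold_le_rank : ∀ (xs : List String) (a : Nat) (p : String),
    p ∈ xs → pvPreferred.contains p = true → xs.foldl pvRankStep a ≤ pvPreferred.idxOf p := by
  intro xs
  induction xs with
  | nil => intro a p hp; simp at hp
  | cons x xs ih =>
      intro a p hp hc
      rcases List.mem_cons.mp hp with rfl | hmem
      · exact le_trans (pvFold_le_init xs (pvRankStep a p)) (pvRankStep_le_rank a p hc)
      · exact ih (pvRankStep a x) p hmem hc

theorem pvFold_mem : ∀ (xs : List String) (a : Nat),
    xs.foldl pvRankStep a = a ∨
    ∃ p, p ∈ xs ∧ pvPreferred.contains p = true ∧ xs.foldl pvRankStep a = pvPreferred.idxOf p := by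
  intro xs
  induction xs with
  | nil => intro a; left; rfl
  | cons x xs ih =>
      intro a
      have hcons : (x :: xs).foldl pvRankStep a = xs.foldl pvRankStep (pvRankStep a x) :=
        List.foldl_cons ..
      rcases ih (pvRankStep a x) with h | ⟨p, hp, hc, hval⟩
      · by_cases hcx : pvPreferred.contains x = true
        · by_cases hlt : pvPreferred.idxOf x < a
          · right
            exact ⟨x, List.mem_cons_self, hcx, by
              rw [hcons, h, pvRankStep_pos a x hcx hlt]⟩
          · left; rw [hcons, h, pvRankStep_keep1 a x hcx hlt]
        · left; rw [hcons, h, pvRankStep_keep2 a x hcx]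
      · right
        exact ⟨p, List.mem_cons_of_mem _ hp, hc, by rw [hcons, hval]⟩

theorem pvFindPref_chain : ∀ (l cand : List String) (k : Nat), k < l.length →
    cand.contains (l.getD k "") = true →
    (∀ j, j < k → cand.contains (l.getD j "") = false) →
    pvFindPref l cand = some (l.getD k "") := by
  intro l
  induction l with
  | nil => intro cand k hk; simp at hk
  | cons x xs ih =>
      intro cand k hk hmem hbefore
      cases k with
      | zero => simp [pvFindPref, List.getD] at hmem ⊢; simp [hmem]
      | succ j =>
          have hx : cand.contains x = false := by
            simpa [List.getD] using hbefore 0 (Nat.succ_pos j)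
          have hrec : pvFindPref xs cand = some (xs.getD j "") := by
            refine ih cand j (by simpa using hk) (by simpa [List.getD] using hmem) ?_
            intro i hi
            simpa [List.getD] using hbefore (i + 1) (Nat.succ_lt_succ hi)
          simp only [pvFindPref]
          rw [if_neg (by simpa using hx), List.getD_cons_succ]
          exact hrec

-- concrete facts about the 6-element preference list
theorem pvIdx_getD : ∀ j : Fin 6, pvPreferred.idxOf (pvPreferred.getD j.val "") = j.val := by decide

theorem pvContains_getD : ∀ j : Fin 6, pvPreferred.contains (pvPreferred.getD j.val "") = true := by decide

theorem pvIdx_lt (p : String) (h : pvPreferred.contains p = true) : pvPreferred.idxOf p < 6 := by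
  have hm : p ∈ pvPreferred := by simpa using h
  simpa [pvPreferred] using List.idxOf_lt_length_of_mem hm

theorem pvGetD_idxOf (p : String) (h : pvPreferred.contains p = true) :
    pvPreferred.getD (pvPreferred.idxOf p) "" = p := by
  have hm : p ∈ pvPreferred := by simpa using h
  have hlt : pvPreferred.idxOf p < pvPreferred.length := List.idxOf_lt_length_of_mem hm
  rw [List.getD_eq_getElem _ _ hlt]
  exact List.getElem_idxOf hlt

theorem pvLen6 : pvPreferred.length = 6 := rfl

-- ===== VERDICT (by name: the statement is the Claim_ definition above) =====
theorem choose_primary_from_eligible_spec : Claim_equal_choose_primary_from_eligible := by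
  intro eligible _
  unfold Spec_choose_primary_from_eligible
  show choose_primary_from_eligible eligible = choose_primary_from_eligible_alt eligible
  simp only [choose_primary_from_eligible, choose_primary_from_eligible_alt]
  by_cases hlt : eligible.foldl pvRankStep pvPreferred.length < pvPreferred.length
  · -- some preferred position occurs in eligible
    rcases pvFold_mem eligible pvPreferred.length with h6 | ⟨p, hp, hc, hval⟩
    · rw [h6] at hlt; omega
    have hq : pvPreferred.getD (eligible.foldl pvRankStep pvPreferred.length) "" = p := by
      rw [hval]; exact pvGetD_idxOf p hc
    have hpc : p ∈ eligible.filter (fun pos => pvPreferred.contains pos) :=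
      List.mem_filter.mpr ⟨hp, hc⟩
    have hne : (eligible.filter (fun pos => pvPreferred.contains pos)).isEmpty = false := by
      cases hE : (eligible.filter (fun pos => pvPreferred.contains pos)).isEmpty
      · rfl
      · rw [List.isEmpty_iff] at hE
        rw [hE] at hpc
        exact absurd hpc (List.not_mem_nil)
    have hfind : pvFindPref pvPreferred (eligible.filter (fun pos => pvPreferred.contains pos))
        = some (pvPreferred.getD (eligible.foldl pvRankStep pvPreferred.length) "") := by
      apply pvFindPref_chain _ _ _ hlt
      · rw [hq]; simpa using hpc
      · intro j hj
        cases hE : (eligible.filter (fun pos => pvPreferred.contains pos)).contains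
            (pvPreferred.getD j "")
        · rfl
        · exfalso
          have hjmem : pvPreferred.getD j "" ∈ eligible.filter (fun pos => pvPreferred.contains pos) := by
            simpa using hE
          have hjel : pvPreferred.getD j "" ∈ eligible := (List.mem_filter.mp hjmem).1
          have hjfin : j < 6 := by
            have hlen := pvLen6
            omega
          have hjc : pvPreferred.contains (pvPreferred.getD j "") = true :=
            pvContains_getD ⟨j, hjfin⟩
          have hle := pvFold_le_rank eligible pvPreferred.length _ hjel hjc
          rw [pvIdx_getD ⟨j, hjfin⟩] at hle
          have hdv : ((⟨j, hjfin⟩ : Fin 6) : ℕ) = j := rfl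
          rw [hdv] at hle
          have hlen := pvLen6
          omega
    rw [if_pos hlt, hne, if_neg Bool.false_ne_true, hfind]
  · -- no preferred position occurs in eligible: both sides fall back
    have hemp : eligible.filter (fun pos => pvPreferred.contains pos) = [] := by
      rw [List.filter_eq_nil_iff]
      intro p hp
      simp only [Bool.not_eq_true]
      cases hc : pvPreferred.contains p
      · rfl
      · exfalso
        have h1 := pvFold_le_rank eligible pvPreferred.length p hp hc
        have h2 := pvIdx_lt p hc
        have hlen := pvLen6
        omega
    rw [if_neg hlt, hemp]
    rfl
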